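-- pv_equiv track=rewrite | github.com/Kaveen-Ambegoda/Smart_Sock | flask-server/server.py | classify_sensor_state
-- ===== SOURCE A (Python) =====
-- def classify_sensor_state(values):
--     """Classify foot contact state based on sensor values with thresholds.
--
--     Thresholds:
--     - Values >= 90 are treated as "maximum pressure" (sensor active)
--     - Values <= 5 are treated as "zero pressure" (sensor inactive)
--     - This handles realistic noisy sensor data from hardware
--     """
--     MAX_THRESHOLD = 90
--     MIN_THRESHOLD = 5
--
--     all_values = [values.get(f"sensor_{i}", 0) for i in range(1, 31)]
--
--     # Check if all sensors show maximum pressure (foot planted)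
--     if all(v >= MAX_THRESHOLD for v in all_values):
--         return "Foot On Ground"
--
--     # Check if all sensors show zero pressure (foot lifted)
--     if all(v <= MIN_THRESHOLD for v in all_values):
--         return "Foot In Air"
--
--     # Check for heel touch: sensors 16-18 active, rest inactive
--     heel_max = all(values.get(f"sensor_{i}", 0) >= MAX_THRESHOLD for i in range(16, 19))
--     heel_rest_zero = all(values.get(f"sensor_{i}", 0) <= MIN_THRESHOLD for i in list(range(1, 16)) + list(range(19, 31)))
--     if heel_max and heel_rest_zero:
--         return "Heel Touch"
--
--     # Check for toe touch: sensors 21-30 active, rest inactive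
--     toe_max = all(values.get(f"sensor_{i}", 0) >= MAX_THRESHOLD for i in range(21, 31))
--     toe_rest_zero = all(values.get(f"sensor_{i}", 0) <= MIN_THRESHOLD for i in range(1, 21))
--     if toe_max and toe_rest_zero:
--         return "Toe Touch"
--
--     return "Unclassified"
-- ===== SOURCE B (Python) =====
-- def classify_sensor_state(values):
--     """Classify via a ternary per-sensor signature and a pattern-table lookup."""
--     def cat(v):
--         return "H" if v >= 90 else ("L" if v <= 5 else "M")
--     sig = "".join(cat(values.get(f"sensor_{i}", 0)) for i in range(1, 31))
--     patterns = {
--         "H" * 30: "Foot On Ground",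
--         "L" * 30: "Foot In Air",
--         "L" * 15 + "H" * 3 + "L" * 12: "Heel Touch",
--         "L" * 20 + "H" * 10: "Toe Touch",
--     }
--     return patterns.get(sig, "Unclassified")
-- ===== Notes on version B (the rewrite author's own statement) =====
-- stated objective: alternative
-- what changed: A runs a cascade of five all(...) range scans with repeated dict lookups; B reads each sensor once into a 30-character ternary signature ('H' >= 90, 'L' <= 5, 'M' otherwise) and classifies with a single lookup of that signature in a table of the four pattern strings.
import Mathlib
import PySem

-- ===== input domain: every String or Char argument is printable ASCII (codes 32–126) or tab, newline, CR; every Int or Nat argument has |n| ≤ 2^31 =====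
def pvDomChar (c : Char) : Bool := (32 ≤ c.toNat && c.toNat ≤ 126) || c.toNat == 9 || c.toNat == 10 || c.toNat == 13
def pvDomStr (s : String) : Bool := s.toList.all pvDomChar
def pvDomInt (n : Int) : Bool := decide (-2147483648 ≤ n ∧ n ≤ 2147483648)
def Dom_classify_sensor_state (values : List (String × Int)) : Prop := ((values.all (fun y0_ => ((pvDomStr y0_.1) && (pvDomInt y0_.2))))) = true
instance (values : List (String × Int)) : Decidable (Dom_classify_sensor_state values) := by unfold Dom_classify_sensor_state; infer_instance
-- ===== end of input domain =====

-- B replaces A's cascade of range scans by computing a 30-character ternary signature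
-- ('H'/'L'/'M' per sensor) once and looking it up in a table of four pattern strings —
-- objective: alternative (different algorithm, same cost).

-- shared helper: the f-string key f"sensor_{i}"
def pvKey (i : Int) : String := "sensor_" ++ PySem.Int.toStr i

-- ===== PORT A =====
def classify_sensor_state (values : List (String × Int)) : String :=
  let d := PySem.Dict.mk values
  let all_values := (PySem.List.pyRange 1 31 1).map (fun i => d.getD (pvKey i) 0)
  if all_values.all (fun v => decide (v ≥ 90)) then "Foot On Ground"
  else if all_values.all (fun v => decide (v ≤ 5)) then "Foot In Air"
  else
    let heel_max := (PySem.List.pyRange 16 19 1).all (fun i => decide (d.getD (pvKey i) 0 ≥ 90))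
    let heel_rest_zero := (PySem.List.pyRange 1 16 1 ++ PySem.List.pyRange 19 31 1).all
      (fun i => decide (d.getD (pvKey i) 0 ≤ 5))
    if heel_max && heel_rest_zero then "Heel Touch"
    else
      let toe_max := (PySem.List.pyRange 21 31 1).all (fun i => decide (d.getD (pvKey i) 0 ≥ 90))
      let toe_rest_zero := (PySem.List.pyRange 1 21 1).all (fun i => decide (d.getD (pvKey i) 0 ≤ 5))
      if toe_max && toe_rest_zero then "Toe Touch"
      else "Unclassified"

-- ===== PORT B =====
-- per-sensor category: "H" (>= 90), "L" (<= 5), "M" (in between)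
def pvCat (v : Int) : String := if v ≥ 90 then "H" else if v ≤ 5 then "L" else "M"

def classify_sensor_state_alt (values : List (String × Int)) : String :=
  let d := PySem.Dict.mk values
  let sig := PySem.Str.join "" ((PySem.List.pyRange 1 31 1).map (fun i => pvCat (d.getD (pvKey i) 0)))
  let patterns : PySem.Dict String String := PySem.Dict.ofList [
    ("HHHHHHHHHHHHHHHHHHHHHHHHHHHHHH", "Foot On Ground"),
    ("LLLLLLLLLLLLLLLLLLLLLLLLLLLLLL", "Foot In Air"),
    ("LLLLLLLLLLLLLLLHHHLLLLLLLLLLLL", "Heel Touch"),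
    ("LLLLLLLLLLLLLLLLLLLLHHHHHHHHHH", "Toe Touch")]
  patterns.getD sig "Unclassified"

-- ===== PRECONDITION & SPEC =====
def Spec_classify_sensor_state (values : List (String × Int)) (out : String) : Prop := out = classify_sensor_state_alt values
instance (values : List (String × Int)) (out : String) : Decidable (Spec_classify_sensor_state values out) := by unfold Spec_classify_sensor_state; infer_instance

-- ===== CLAIM (what is proved, stated in full; the proofs are below) =====
def Claim_equal_classify_sensor_state : Prop := ∀ (values : List (String × Int)), Dom_classify_sensor_state values → Spec_classify_sensor_state values (classify_sensor_state values)

-- ===== LEMMAS AND PROOFS =====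

-- the character actually produced for value v
def pvCatChar (v : Int) : Char := if v ≥ 90 then 'H' else if v ≤ 5 then 'L' else 'M'

lemma toList_pvCat (v : Int) : (pvCat v).toList = [pvCatChar v] := by
  unfold pvCat pvCatChar; split_ifs <;> rfl

lemma pvCatChar_eq_H (v : Int) : pvCatChar v = 'H' ↔ v ≥ 90 := by
  unfold pvCatChar; split_ifs <;> simp_all

lemma pvCatChar_eq_L (v : Int) : pvCatChar v = 'L' ↔ v ≤ 5 := by
  unfold pvCatChar; split_ifs <;> simp_all; omega

lemma pv_sig_toList (g : Int → Int) :
    (PySem.Str.join "" ((PySem.List.pyRange 1 31 1).map (fun i => pvCat (g i)))).toList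
      = (PySem.List.pyRange 1 31 1).map (fun i => pvCatChar (g i)) := by
  simp only [pysem]
  rw [show (List.map String.toList (List.map (fun i => pvCat (g i)) (PySem.List.pyRange 1 31 1)))
        = ((PySem.List.pyRange 1 31 1).map (fun i => pvCatChar (g i))).map (fun c => [c]) by
      simp [List.map_map, Function.comp_def, toList_pvCat],
     show ("" : String).toList = ([] : List Char) from rfl]
  exact PySem.Chars.join_nil_singletons _

-- condition 1
lemma pv_c1 (g : Int → Int) :
    (((PySem.List.pyRange 1 31 1).map (fun i => g i)).all (fun v => decide (v ≥ 90)) = true)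
      ↔ ((PySem.List.pyRange 1 31 1).map (fun i => pvCatChar (g i))
          = ("HHHHHHHHHHHHHHHHHHHHHHHHHHHHHH" : String).toList) := by
  rw [show ("HHHHHHHHHHHHHHHHHHHHHHHHHHHHHH" : String).toList
        = (PySem.List.pyRange 1 31 1).map (fun _ => 'H') from by decide]
  rw [List.map_eq_map_iff]
  simp [List.all_map, List.all_eq_true, pvCatChar_eq_H]

lemma pv_lookup (sig : String) :
    (PySem.Dict.ofList [("HHHHHHHHHHHHHHHHHHHHHHHHHHHHHH", "Foot On Ground"),
       ("LLLLLLLLLLLLLLLLLLLLLLLLLLLLLL", "Foot In Air"),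
       ("LLLLLLLLLLLLLLLHHHLLLLLLLLLLLL", "Heel Touch"),
       ("LLLLLLLLLLLLLLLLLLLLHHHHHHHHHH", "Toe Touch")] : PySem.Dict String String).getD sig "Unclassified"
    = if sig = "HHHHHHHHHHHHHHHHHHHHHHHHHHHHHH" then "Foot On Ground"
      else if sig = "LLLLLLLLLLLLLLLLLLLLLLLLLLLLLL" then "Foot In Air"
      else if sig = "LLLLLLLLLLLLLLLHHHLLLLLLLLLLLL" then "Heel Touch"
      else if sig = "LLLLLLLLLLLLLLLLLLLLHHHHHHHHHH" then "Toe Touch"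
      else "Unclassified" := by
  rw [PySem.Dict.getD_eq_get?_getD]
  simp only [PySem.Dict.get?]
  rw [show (PySem.Dict.ofList [("HHHHHHHHHHHHHHHHHHHHHHHHHHHHHH", "Foot On Ground"),
       ("LLLLLLLLLLLLLLLLLLLLLLLLLLLLLL", "Foot In Air"),
       ("LLLLLLLLLLLLLLLHHHLLLLLLLLLLLL", "Heel Touch"),
       ("LLLLLLLLLLLLLLLLLLLLHHHHHHHHHH", "Toe Touch")] : PySem.Dict String String).items
      = [("HHHHHHHHHHHHHHHHHHHHHHHHHHHHHH", "Foot On Ground"),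
       ("LLLLLLLLLLLLLLLLLLLLLLLLLLLLLL", "Foot In Air"),
       ("LLLLLLLLLLLLLLLHHHLLLLLLLLLLLL", "Heel Touch"),
       ("LLLLLLLLLLLLLLLLLLLLHHHHHHHHHH", "Toe Touch")] from by decide]
  simp only [List.find?]
  split_ifs with a b c d
  · subst a; decide
  · subst b; decide
  · subst c; decide
  · subst d; decide
  · simp only [show ("HHHHHHHHHHHHHHHHHHHHHHHHHHHHHH" == sig) = false from beq_eq_false_iff_ne.mpr (Ne.symm a),
      show ("LLLLLLLLLLLLLLLLLLLLLLLLLLLLLL" == sig) = false from beq_eq_false_iff_ne.mpr (Ne.symm b),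
      show ("LLLLLLLLLLLLLLLHHHLLLLLLLLLLLL" == sig) = false from beq_eq_false_iff_ne.mpr (Ne.symm c),
      show ("LLLLLLLLLLLLLLLLLLLLHHHHHHHHHH" == sig) = false from beq_eq_false_iff_ne.mpr (Ne.symm d)]
    rfl

lemma pv_c2 (g : Int → Int) :
    (((PySem.List.pyRange 1 31 1).map (fun i => g i)).all (fun v => decide (v ≤ 5)) = true)
      ↔ ((PySem.List.pyRange 1 31 1).map (fun i => pvCatChar (g i))
          = ("LLLLLLLLLLLLLLLLLLLLLLLLLLLLLL" : String).toList) := by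
  rw [show ("LLLLLLLLLLLLLLLLLLLLLLLLLLLLLL" : String).toList
        = (PySem.List.pyRange 1 31 1).map (fun _ => 'L') from by decide]
  rw [List.map_eq_map_iff]
  simp [List.all_map, List.all_eq_true, pvCatChar_eq_L]

lemma pv_c3 (g : Int → Int) :
    (((PySem.List.pyRange 16 19 1).all (fun i => decide (g i ≥ 90)) &&
      (PySem.List.pyRange 1 16 1 ++ PySem.List.pyRange 19 31 1).all (fun i => decide (g i ≤ 5))) = true)
      ↔ ((PySem.List.pyRange 1 31 1).map (fun i => pvCatChar (g i))
          = ("LLLLLLLLLLLLLLLHHHLLLLLLLLLLLL" : String).toList) := by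
  rw [show ("LLLLLLLLLLLLLLLHHHLLLLLLLLLLLL" : String).toList
        = (PySem.List.pyRange 1 31 1).map (fun i => if 16 ≤ i ∧ i ≤ 18 then 'H' else 'L') from by decide]
  rw [List.map_eq_map_iff,
      show PySem.List.pyRange 1 31 1
        = PySem.List.pyRange 1 16 1 ++ (PySem.List.pyRange 16 19 1 ++ PySem.List.pyRange 19 31 1) from by decide]
  simp only [List.forall_mem_append, List.all_append, Bool.and_eq_true, List.all_eq_true, decide_eq_true_eq]
  constructor
  · rintro ⟨h2, h1, h3⟩
    refine ⟨fun i hi => ?_, fun i hi => ?_, fun i hi => ?_⟩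
    · have hv := h1 i hi; rw [PySem.List.mem_pyRange_one] at hi
      rw [if_neg (by omega)]; exact (pvCatChar_eq_L _).2 hv
    · have hv := h2 i hi; rw [PySem.List.mem_pyRange_one] at hi
      rw [if_pos (by omega)]; exact (pvCatChar_eq_H _).2 hv
    · have hv := h3 i hi; rw [PySem.List.mem_pyRange_one] at hi
      rw [if_neg (by omega)]; exact (pvCatChar_eq_L _).2 hv
  · rintro ⟨h1, h2, h3⟩
    refine ⟨fun i hi => ?_, fun i hi => ?_, fun i hi => ?_⟩
    · have hv := h2 i hi; rw [PySem.List.mem_pyRange_one] at hi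
      rw [if_pos (by omega)] at hv; exact (pvCatChar_eq_H _).1 hv
    · have hv := h1 i hi; rw [PySem.List.mem_pyRange_one] at hi
      rw [if_neg (by omega)] at hv; exact (pvCatChar_eq_L _).1 hv
    · have hv := h3 i hi; rw [PySem.List.mem_pyRange_one] at hi
      rw [if_neg (by omega)] at hv; exact (pvCatChar_eq_L _).1 hv

lemma pv_c4 (g : Int → Int) :
    (((PySem.List.pyRange 21 31 1).all (fun i => decide (g i ≥ 90)) &&
      (PySem.List.pyRange 1 21 1).all (fun i => decide (g i ≤ 5))) = true)
      ↔ ((PySem.List.pyRange 1 31 1).map (fun i => pvCatChar (g i))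
          = ("LLLLLLLLLLLLLLLLLLLLHHHHHHHHHH" : String).toList) := by
  rw [show ("LLLLLLLLLLLLLLLLLLLLHHHHHHHHHH" : String).toList
        = (PySem.List.pyRange 1 31 1).map (fun i => if 21 ≤ i then 'H' else 'L') from by decide]
  rw [List.map_eq_map_iff,
      show PySem.List.pyRange 1 31 1
        = PySem.List.pyRange 1 21 1 ++ PySem.List.pyRange 21 31 1 from by decide]
  simp only [List.forall_mem_append, Bool.and_eq_true, List.all_eq_true, decide_eq_true_eq]
  constructor
  · rintro ⟨h2, h1⟩
    refine ⟨fun i hi => ?_, fun i hi => ?_⟩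
    · have hv := h1 i hi; rw [PySem.List.mem_pyRange_one] at hi
      rw [if_neg (by omega)]; exact (pvCatChar_eq_L _).2 hv
    · have hv := h2 i hi; rw [PySem.List.mem_pyRange_one] at hi
      rw [if_pos (by omega)]; exact (pvCatChar_eq_H _).2 hv
  · rintro ⟨h1, h2⟩
    refine ⟨fun i hi => ?_, fun i hi => ?_⟩
    · have hv := h2 i hi; rw [PySem.List.mem_pyRange_one] at hi
      rw [if_pos (by omega)] at hv; exact (pvCatChar_eq_H _).1 hv
    · have hv := h1 i hi; rw [PySem.List.mem_pyRange_one] at hi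
      rw [if_neg (by omega)] at hv; exact (pvCatChar_eq_L _).1 hv

lemma pv_ports_eq (g : Int → Int) :
    (let all_values := (PySem.List.pyRange 1 31 1).map (fun i => g i)
     if all_values.all (fun v => decide (v ≥ 90)) then "Foot On Ground"
     else if all_values.all (fun v => decide (v ≤ 5)) then "Foot In Air"
     else
       let heel_max := (PySem.List.pyRange 16 19 1).all (fun i => decide (g i ≥ 90))
       let heel_rest_zero := (PySem.List.pyRange 1 16 1 ++ PySem.List.pyRange 19 31 1).all
         (fun i => decide (g i ≤ 5))
       if heel_max && heel_rest_zero then "Heel Touch"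
       else
         let toe_max := (PySem.List.pyRange 21 31 1).all (fun i => decide (g i ≥ 90))
         let toe_rest_zero := (PySem.List.pyRange 1 21 1).all (fun i => decide (g i ≤ 5))
         if toe_max && toe_rest_zero then "Toe Touch"
         else "Unclassified") =
    (let sig := PySem.Str.join "" ((PySem.List.pyRange 1 31 1).map (fun i => pvCat (g i)))
     let patterns : PySem.Dict String String := PySem.Dict.ofList [
       ("HHHHHHHHHHHHHHHHHHHHHHHHHHHHHH", "Foot On Ground"),
       ("LLLLLLLLLLLLLLLLLLLLLLLLLLLLLL", "Foot In Air"),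
       ("LLLLLLLLLLLLLLLHHHLLLLLLLLLLLL", "Heel Touch"),
       ("LLLLLLLLLLLLLLLLLLLLHHHHHHHHHH", "Toe Touch")]
     patterns.getD sig "Unclassified") := by
  have hsig := pv_sig_toList g
  dsimp only
  rw [pv_lookup]
  by_cases h1 : (PySem.List.pyRange 1 31 1).map (fun i => pvCatChar (g i))
      = ("HHHHHHHHHHHHHHHHHHHHHHHHHHHHHH" : String).toList
  · rw [if_pos ((pv_c1 g).2 h1), if_pos (String.toList_inj.mp (hsig.trans h1))]
  · rw [if_neg (fun hc => h1 ((pv_c1 g).1 hc)),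
        if_neg (fun hc => h1 (hsig.symm.trans (congrArg String.toList hc)))]
    by_cases h2 : (PySem.List.pyRange 1 31 1).map (fun i => pvCatChar (g i))
        = ("LLLLLLLLLLLLLLLLLLLLLLLLLLLLLL" : String).toList
    · rw [if_pos ((pv_c2 g).2 h2), if_pos (String.toList_inj.mp (hsig.trans h2))]
    · rw [if_neg (fun hc => h2 ((pv_c2 g).1 hc)),
          if_neg (fun hc => h2 (hsig.symm.trans (congrArg String.toList hc)))]
      by_cases h3 : (PySem.List.pyRange 1 31 1).map (fun i => pvCatChar (g i))
          = ("LLLLLLLLLLLLLLLHHHLLLLLLLLLLLL" : String).toList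
      · rw [if_pos ((pv_c3 g).2 h3), if_pos (String.toList_inj.mp (hsig.trans h3))]
      · rw [if_neg (fun hc => h3 ((pv_c3 g).1 hc)),
            if_neg (fun hc => h3 (hsig.symm.trans (congrArg String.toList hc)))]
        by_cases h4 : (PySem.List.pyRange 1 31 1).map (fun i => pvCatChar (g i))
            = ("LLLLLLLLLLLLLLLLLLLLHHHHHHHHHH" : String).toList
        · rw [if_pos ((pv_c4 g).2 h4), if_pos (String.toList_inj.mp (hsig.trans h4))]
        · rw [if_neg (fun hc => h4 ((pv_c4 g).1 hc)),
              if_neg (fun hc => h4 (hsig.symm.trans (congrArg String.toList hc)))]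

-- ===== VERDICT (by name: the statement is the Claim_ definition above) =====
theorem classify_sensor_state_spec : Claim_equal_classify_sensor_state := by
  intro values _
  unfold Spec_classify_sensor_state classify_sensor_state classify_sensor_state_alt
  exact pv_ports_eq (fun i => (PySem.Dict.mk values).getD (pvKey i) 0)
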